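-- pv_equiv track=rewrite | github.com/BehroozMoniri/Python_GUI_Projects | Maths/squareSpiral.py | d1
-- ===== SOURCE A (Python) =====
-- def d1(x=5):
--     sum1= 1
--     d1 = set()
--     d1.add(1)
--     for i in range(1, x):
--         sum1 += 4*i
--         d1.add(sum1)
--         sum1 += 4*i
--         d1.add(sum1)
--     return d1
-- ===== SOURCE B (Python) =====
-- def d1(x=5):
--     # closed forms for the two diagonal values of ring i: 4*i*i+1 and (2*i+1)**2
--     return {1, *(v for i in range(1, x) for v in (4 * i * i + 1, (2 * i + 1) ** 2))}
-- ===== Notes on version B (the rewrite author's own statement) =====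
-- stated objective: simpler
-- what changed: Replaces the sequential accumulator loop (sum1 repeatedly incremented by 4*i) with a single set comprehension over closed-form formulas 4*i*i+1 and (2*i+1)**2 per ring.
import Mathlib
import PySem

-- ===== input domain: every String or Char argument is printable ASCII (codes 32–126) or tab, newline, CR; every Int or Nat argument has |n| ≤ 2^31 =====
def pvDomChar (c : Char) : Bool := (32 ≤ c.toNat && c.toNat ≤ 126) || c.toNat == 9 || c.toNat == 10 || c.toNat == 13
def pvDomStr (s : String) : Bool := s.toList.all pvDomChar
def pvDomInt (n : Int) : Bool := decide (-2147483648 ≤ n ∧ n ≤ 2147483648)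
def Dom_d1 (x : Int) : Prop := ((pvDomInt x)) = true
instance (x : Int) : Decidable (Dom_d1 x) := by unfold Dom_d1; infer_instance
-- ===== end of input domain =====

-- B replaces A's running-sum accumulator loop by one set comprehension of the two
-- closed-form ring values 4*i*i+1 and (2*i+1)**2 (objective: simpler).


-- ===== PORT A =====
-- sum1 = 1; d1 = set(); d1.add(1); for i in range(1,x): sum1 += 4*i; d1.add(sum1); sum1 += 4*i; d1.add(sum1)
def d1 (x : Int) : List Int :=
  let st := (PySem.List.pyRange 1 x 1).foldl
    (fun (st : Int × PySem.Set Int) i =>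
      let s1 := st.1 + 4 * i
      let d := PySem.Set.add st.2 s1
      let s2 := s1 + 4 * i
      (s2, PySem.Set.add d s2))
    (1, PySem.Set.add PySem.Set.empty 1)
  st.2

-- ===== PORT B =====
-- return {1, *(v for i in range(1, x) for v in (4*i*i + 1, (2*i + 1)**2))}
def d1_alt (x : Int) : List Int :=
  PySem.Set.ofList (1 :: (PySem.List.pyRange 1 x 1).flatMap
    (fun i => [4 * i * i + 1, (2 * i + 1) ^ 2]))

-- ===== PRECONDITION & SPEC =====
def Spec_d1 (x : Int) (out : List Int) : Prop := out = d1_alt x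
instance (x : Int) (out : List Int) : Decidable (Spec_d1 x out) := by unfold Spec_d1; infer_instance

-- ===== CLAIM (what is proved, stated in full; the proofs are below) =====
def Claim_equal_d1 : Prop := ∀ (x : Int), Dom_d1 x → Spec_d1 x (d1 x)

-- ===== LEMMAS AND PROOFS =====

-- the common spine: the diagonal values in A's insertion order for bound 1 + n
def spL : Nat → List Int
  | 0 => [1]
  | n + 1 => spL n ++ [4 * ((n : Int) + 1) ^ 2 + 1, (2 * ((n : Int) + 1) + 1) ^ 2]

lemma spL_bound (n : Nat) : ∀ y ∈ spL n, y ≤ (2 * (n : Int) + 1) ^ 2 := by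
  induction n with
  | zero => intro y hy; simp [spL] at hy; subst hy; norm_num
  | succ n ih =>
    intro y hy
    simp only [spL, List.mem_append, List.mem_cons, List.not_mem_nil, or_false] at hy
    have hn : (0:Int) ≤ (n : Int) := Int.natCast_nonneg n
    rcases hy with h | h | h
    · have := ih y h; push_cast; nlinarith
    · subst h; push_cast; nlinarith
    · subst h; push_cast; nlinarith

lemma spL_nodup (n : Nat) : (spL n).Nodup := by
  induction n with
  | zero => simp [spL]
  | succ n ih =>
    have hb := spL_bound n
    have hn : (0:Int) ≤ (n : Int) := Int.natCast_nonneg n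
    rw [spL, List.nodup_append]
    refine ⟨ih, ?_, ?_⟩
    · rw [List.nodup_cons]
      refine ⟨fun h => ?_, by simp⟩
      rw [List.mem_singleton] at h
      nlinarith
    · intro y hy z hz
      have hby := hb _ hy
      rcases List.mem_cons.mp hz with h | h
      · subst h; intro he; rw [he] at hby; nlinarith
      · rw [List.mem_singleton] at h; subst h; intro he; rw [he] at hby; nlinarith

lemma add_not_mem {s : PySem.Set Int} {a : Int} (h : a ∉ s) :
    PySem.Set.add s a = s ++ [a] := by
  simp [PySem.Set.add, PySem.Set.contains]
  intro hc
  exact absurd hc h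

-- A's fold over range(1, 1+n) produces ((2n+1)^2, spL n)
lemma d1_fold (n : Nat) :
    (PySem.List.pyRange 1 (1 + (n : Int)) 1).foldl
      (fun (st : Int × PySem.Set Int) i =>
        let s1 := st.1 + 4 * i
        let d := PySem.Set.add st.2 s1
        let s2 := s1 + 4 * i
        (s2, PySem.Set.add d s2))
      (1, PySem.Set.add PySem.Set.empty 1)
    = ((2 * (n : Int) + 1) ^ 2, spL n) := by
  induction n with
  | zero =>
    rw [show (1 + ((0:Nat) : Int)) = 1 by norm_num, PySem.List.pyRange_one_eq_nil le_rfl]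
    simp [PySem.Set.add, PySem.Set.empty, PySem.Set.contains, spL]
  | succ n ih =>
    have hn : (0:Int) ≤ (n : Int) := Int.natCast_nonneg n
    have hsplit : PySem.List.pyRange 1 (1 + ((n + 1 : Nat) : Int)) 1
        = PySem.List.pyRange 1 (1 + (n : Int)) 1 ++ [1 + (n : Int)] := by
      have h1 : (1 : Int) ≤ 1 + (n : Int) := by omega
      have := PySem.List.pyRange_one_succ_right (a := 1) (b := 1 + (n : Int)) h1
      rw [show (1 + ((n + 1 : Nat) : Int)) = 1 + (n : Int) + 1 by push_cast; ring]
      exact this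
    have hb := spL_bound n
    have ha : (2 * (n : Int) + 1) ^ 2 + 4 * (1 + (n : Int)) ∉ spL n := by
      intro h; have := hb _ h; nlinarith
    have ha' : (2 * (n : Int) + 1) ^ 2 + 4 * (1 + (n : Int)) + 4 * (1 + (n : Int))
        ∉ spL n ++ [(2 * (n : Int) + 1) ^ 2 + 4 * (1 + (n : Int))] := by
      simp only [List.mem_append, List.mem_singleton]
      rintro (h | h)
      · have := hb _ h; nlinarith
      · nlinarith
    rw [hsplit, List.foldl_append, ih]
    simp only [List.foldl_cons, List.foldl_nil]
    rw [add_not_mem ha, add_not_mem ha']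
    have e1 : (2 * (n : Int) + 1) ^ 2 + 4 * (1 + (n : Int))
        = 4 * ((n : Int) + 1) ^ 2 + 1 := by ring
    have e2 : (2 * (n : Int) + 1) ^ 2 + 4 * (1 + (n : Int)) + 4 * (1 + (n : Int))
        = (2 * ((n : Int) + 1) + 1) ^ 2 := by ring
    rw [e2, e1, spL]
    refine Prod.ext ?_ ?_
    · show (2 * ((n : Int) + 1) + 1) ^ 2 = (2 * ((n + 1 : Nat) : Int) + 1) ^ 2
      push_cast; ring
    · show spL n ++ [4 * ((n : Int) + 1) ^ 2 + 1] ++ [(2 * ((n : Int) + 1) + 1) ^ 2]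
        = spL n ++ [4 * ((n : Int) + 1) ^ 2 + 1, (2 * ((n : Int) + 1) + 1) ^ 2]
      simp

-- B's flatMap over range(1, 1+n), with 1 in front, is also spL n
lemma d1_flat (n : Nat) :
    1 :: (PySem.List.pyRange 1 (1 + (n : Int)) 1).flatMap
      (fun i => [4 * i * i + 1, (2 * i + 1) ^ 2]) = spL n := by
  induction n with
  | zero =>
    rw [show (1 + ((0:Nat) : Int)) = 1 by norm_num, PySem.List.pyRange_one_eq_nil le_rfl]
    simp [spL]
  | succ n ih =>
    have hn : (0:Int) ≤ (n : Int) := Int.natCast_nonneg n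
    have hsplit : PySem.List.pyRange 1 (1 + ((n + 1 : Nat) : Int)) 1
        = PySem.List.pyRange 1 (1 + (n : Int)) 1 ++ [1 + (n : Int)] := by
      have h1 : (1 : Int) ≤ 1 + (n : Int) := by omega
      have := PySem.List.pyRange_one_succ_right (a := 1) (b := 1 + (n : Int)) h1
      rw [show (1 + ((n + 1 : Nat) : Int)) = 1 + (n : Int) + 1 by push_cast; ring]
      exact this
    rw [hsplit, List.flatMap_append, ← List.cons_append, ih]
    simp only [List.flatMap_cons, List.flatMap_nil, List.append_nil, spL]
    have e1 : 4 * (1 + (n : Int)) * (1 + (n : Int)) + 1 = 4 * ((n : Int) + 1) ^ 2 + 1 := by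
      ring
    have e2 : (2 * (1 + (n : Int)) + 1) ^ 2 = (2 * ((n : Int) + 1) + 1) ^ 2 := by ring
    rw [e1, e2]

lemma d1_alt_eq (n : Nat) : d1_alt (1 + (n : Int)) = spL n := by
  have hflat := d1_flat n
  unfold d1_alt
  rw [hflat]
  exact PySem.Set.ofList_eq_self_of_nodup _ (spL_nodup n)

-- ===== VERDICT (by name: the statement is the Claim_ definition above) =====
theorem d1_spec : Claim_equal_d1 := by
  intro x _
  unfold Spec_d1
  by_cases hx : x ≤ 1
  · unfold d1 d1_alt
    rw [PySem.List.pyRange_one_eq_nil hx]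
    simp [PySem.Set.add, PySem.Set.empty, PySem.Set.contains, PySem.Set.ofList]
  · obtain ⟨n, hn⟩ : ∃ n : Nat, x = 1 + (n : Int) := ⟨(x - 1).toNat, by omega⟩
    subst hn
    rw [d1_alt_eq n]
    unfold d1
    rw [d1_fold n]
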